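-- pv_equiv track=rewrite | github.com/RyanTan182/code-agent | agent.py | extract_code_elements
-- ===== SOURCE A (Python) =====
-- from typing import List
--
-- def extract_code_elements(lines: List[str]) -> tuple[List[str], List[str], List[str]]:
--     """Extract classes, functions, and imports from code."""
--     classes, functions, imports = [], [], []
--
--     for i, line in enumerate(lines[:100], 1):
--         stripped = line.strip()
--
--         if stripped.startswith("class "):
--             class_name = stripped.split("(")[0].replace("class ", "").strip(":")
--             classes.append(f"  - {class_name} (line {i})")
--         elif stripped.startswith("def "):
--             func_name = stripped.split("(")[0].replace("def ", "").strip()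
--             if not func_name.startswith("_"):
--                 functions.append(f"  - {func_name}() (line {i})")
--         elif stripped.startswith(("import ", "from ")):
--             imports.append(stripped)
--
--     return classes, functions, imports
-- ===== SOURCE B (Python) =====
-- from typing import List
--
-- def extract_code_elements(lines: List[str]) -> tuple[List[str], List[str], List[str]]:
--     """Extract classes, functions, and imports from code (three independent scans)."""
--     numbered = [(i, line.strip()) for i, line in enumerate(lines[:100], 1)]
--
--     classes = [
--         "  - {} (line {})".format(s.split("(")[0].replace("class ", "").strip(":"), i)
--         for i, s in numbered if s.startswith("class ")
--     ]
--     functions = [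
--         "  - {}() (line {})".format(s.split("(")[0].replace("def ", "").strip(), i)
--         for i, s in numbered
--         if s.startswith("def ") and not s.split("(")[0].replace("def ", "").strip().startswith("_")
--     ]
--     imports = [s for i, s in numbered if s.startswith(("import ", "from "))]
--
--     return classes, functions, imports
-- ===== Notes on version B (the rewrite author's own statement) =====
-- stated objective: alternative
-- what changed: Replaces the single loop with shared if/elif accumulators by three independent filtered passes (classes, functions, imports) over the stripped, enumerated first 100 lines; the prefixes 'class ', 'def ', 'import '/'from ' are mutually exclusive so the passes reproduce the elif chain exactly.
import Mathlib
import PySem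

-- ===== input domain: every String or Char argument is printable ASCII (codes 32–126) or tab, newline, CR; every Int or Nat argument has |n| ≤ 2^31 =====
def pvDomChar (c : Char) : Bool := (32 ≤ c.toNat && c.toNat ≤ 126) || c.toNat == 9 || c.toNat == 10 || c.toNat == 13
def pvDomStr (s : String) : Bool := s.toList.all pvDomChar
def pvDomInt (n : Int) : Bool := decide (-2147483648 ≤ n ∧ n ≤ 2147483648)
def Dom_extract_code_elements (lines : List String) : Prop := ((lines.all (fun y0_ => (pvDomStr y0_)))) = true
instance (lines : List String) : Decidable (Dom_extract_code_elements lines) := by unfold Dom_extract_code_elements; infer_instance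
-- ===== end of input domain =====

-- B replaces A's single if/elif loop with three independent filtered passes over the
-- stripped enumerated first-100 lines (same cost; an alternative decomposition).

-- ===== PORT A =====
-- one loop over enumerate(lines[:100], 1), if/elif chain, three shared accumulators
def extract_code_elements (lines : List String) : List String × List String × List String :=
  (PySem.List.enumerate (PySem.List.slice lines none (some 100)) 1).foldl
    (fun acc p =>
      let stripped := PySem.Str.strip p.2
      if PySem.Str.startswith stripped "class " then
        let class_name := PySem.Str.stripChars
          (PySem.Str.replace (((PySem.Str.split? stripped "(").getD []).headD "") "class " "") ":"
        (acc.1 ++ ["  - " ++ class_name ++ " (line " ++ PySem.Int.toStr p.1 ++ ")"], acc.2.1, acc.2.2)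
      else if PySem.Str.startswith stripped "def " then
        let func_name := PySem.Str.strip
          (PySem.Str.replace (((PySem.Str.split? stripped "(").getD []).headD "") "def " "")
        if !(PySem.Str.startswith func_name "_") then
          (acc.1, acc.2.1 ++ ["  - " ++ func_name ++ "() (line " ++ PySem.Int.toStr p.1 ++ ")"], acc.2.2)
        else acc
      else if PySem.Str.startswith stripped "import " || PySem.Str.startswith stripped "from " then
        (acc.1, acc.2.1, acc.2.2 ++ [stripped])
      else acc)
    ([], [], [])

-- ===== PORT B =====
-- precompute the stripped numbered lines once, then three independent filtered passes
def extract_code_elements_alt (lines : List String) : List String × List String × List String :=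
  let numbered := (PySem.List.enumerate (PySem.List.slice lines none (some 100)) 1).map
    (fun p => (p.1, PySem.Str.strip p.2))
  let classes := numbered.filterMap (fun q =>
    if PySem.Str.startswith q.2 "class " then
      some ("  - " ++ PySem.Str.stripChars
        (PySem.Str.replace (((PySem.Str.split? q.2 "(").getD []).headD "") "class " "") ":"
        ++ " (line " ++ PySem.Int.toStr q.1 ++ ")")
    else none)
  let functions := numbered.filterMap (fun q =>
    if PySem.Str.startswith q.2 "def " &&
       !(PySem.Str.startswith
          (PySem.Str.strip (PySem.Str.replace (((PySem.Str.split? q.2 "(").getD []).headD "") "def " "")) "_") then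
      some ("  - " ++
        PySem.Str.strip (PySem.Str.replace (((PySem.Str.split? q.2 "(").getD []).headD "") "def " "")
        ++ "() (line " ++ PySem.Int.toStr q.1 ++ ")")
    else none)
  let imports := (numbered.filter (fun q =>
    PySem.Str.startswith q.2 "import " || PySem.Str.startswith q.2 "from ")).map (·.2)
  (classes, functions, imports)

-- ===== PRECONDITION & SPEC =====
def Spec_extract_code_elements (lines : List String) (out : List String × List String × List String) : Prop := out = extract_code_elements_alt lines
instance (lines : List String) (out : List String × List String × List String) : Decidable (Spec_extract_code_elements lines out) := by unfold Spec_extract_code_elements; infer_instance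

-- ===== CLAIM (what is proved, stated in full; the proofs are below) =====
def Claim_equal_extract_code_elements : Prop := ∀ (lines : List String), Dom_extract_code_elements lines → Spec_extract_code_elements lines (extract_code_elements lines)

-- ===== LEMMAS AND PROOFS =====

-- proof-only names for B's three pass functions and A's loop step on stripped pairs
def eceFc (q : Int × String) : Option String :=
  if PySem.Str.startswith q.2 "class " then
    some ("  - " ++ PySem.Str.stripChars
      (PySem.Str.replace (((PySem.Str.split? q.2 "(").getD []).headD "") "class " "") ":"
      ++ " (line " ++ PySem.Int.toStr q.1 ++ ")")
  else none

def eceFf (q : Int × String) : Option String :=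
  if PySem.Str.startswith q.2 "def " &&
     !(PySem.Str.startswith
        (PySem.Str.strip (PySem.Str.replace (((PySem.Str.split? q.2 "(").getD []).headD "") "def " "")) "_") then
    some ("  - " ++
      PySem.Str.strip (PySem.Str.replace (((PySem.Str.split? q.2 "(").getD []).headD "") "def " "")
      ++ "() (line " ++ PySem.Int.toStr q.1 ++ ")")
  else none

def eceFi (q : Int × String) : Bool :=
  PySem.Str.startswith q.2 "import " || PySem.Str.startswith q.2 "from "

def eceStep (acc : List String × List String × List String) (q : Int × String) :
    List String × List String × List String :=
  if PySem.Str.startswith q.2 "class " then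
    (acc.1 ++ ["  - " ++ PySem.Str.stripChars
      (PySem.Str.replace (((PySem.Str.split? q.2 "(").getD []).headD "") "class " "") ":"
      ++ " (line " ++ PySem.Int.toStr q.1 ++ ")"], acc.2.1, acc.2.2)
  else if PySem.Str.startswith q.2 "def " then
    if !(PySem.Str.startswith
          (PySem.Str.strip (PySem.Str.replace (((PySem.Str.split? q.2 "(").getD []).headD "") "def " "")) "_") then
      (acc.1, acc.2.1 ++ ["  - " ++
        PySem.Str.strip (PySem.Str.replace (((PySem.Str.split? q.2 "(").getD []).headD "") "def " "")
        ++ "() (line " ++ PySem.Int.toStr q.1 ++ ")"], acc.2.2)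
    else acc
  else if PySem.Str.startswith q.2 "import " || PySem.Str.startswith q.2 "from " then
    (acc.1, acc.2.1, acc.2.2 ++ [q.2])
  else acc

-- two nonempty prefixes of the same list share their first character
lemma ece_pfx_excl {a b : Char} {p q L : List Char} (hne : a ≠ b)
    (h : (a :: p) <+: L) : ¬ (b :: q) <+: L := by
  rintro ⟨t2, e2⟩
  obtain ⟨t1, e1⟩ := h
  rw [← e1] at e2
  simp only [List.cons_append, List.cons.injEq] at e2
  exact hne e2.1.symm

-- a string starting with one keyword cannot start with another whose first char differs
lemma ece_sw_excl (s p q : String) (a b : Char) (tp tq : List Char)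
    (hp : p.toList = a :: tp) (hq : q.toList = b :: tq) (hne : a ≠ b)
    (h : PySem.Str.startswith s p = true) : PySem.Str.startswith s q = false := by
  rw [PySem.Str.startswith_eq, PySem.Chars.startswith_iff, hp] at h
  cases hb : PySem.Str.startswith s q with
  | false => rfl
  | true =>
      rw [PySem.Str.startswith_eq, PySem.Chars.startswith_iff, hq] at hb
      exact absurd hb (ece_pfx_excl hne h)

lemma ece_foldl_split (m : List (Int × String)) (cs fs is : List String) :
    m.foldl eceStep (cs, fs, is) =
      (cs ++ m.filterMap eceFc, fs ++ m.filterMap eceFf, is ++ (m.filter eceFi).map (·.2)) := by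
  induction m generalizing cs fs is with
  | nil => simp
  | cons q t ih =>
    simp only [List.foldl_cons, List.filterMap_cons, List.filter_cons]
    by_cases hc : PySem.Str.startswith q.2 "class " = true
    · have hd := ece_sw_excl q.2 "class " "def " 'c' 'd' _ _ rfl rfl (by decide) hc
      have hi := ece_sw_excl q.2 "class " "import " 'c' 'i' _ _ rfl rfl (by decide) hc
      have hf := ece_sw_excl q.2 "class " "from " 'c' 'f' _ _ rfl rfl (by decide) hc
      simp only [eceStep, eceFc, eceFf, eceFi, hc, hd, hi, hf, if_true, Bool.false_and, Bool.or_self, ih]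
      simp
    · rw [Bool.not_eq_true] at hc
      by_cases hdef : PySem.Str.startswith q.2 "def " = true
      · have hi := ece_sw_excl q.2 "def " "import " 'd' 'i' _ _ rfl rfl (by decide) hdef
        have hf := ece_sw_excl q.2 "def " "from " 'd' 'f' _ _ rfl rfl (by decide) hdef
        by_cases hu : PySem.Str.startswith
            (PySem.Str.strip (PySem.Str.replace (((PySem.Str.split? q.2 "(").getD []).headD "") "def " "")) "_" = true
        · simp only [eceStep, eceFc, eceFf, eceFi, hc, hdef, hu, hi, hf, if_true, Bool.not_true, Bool.and_false, Bool.or_self, ih]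
          simp
        · rw [Bool.not_eq_true] at hu
          simp only [eceStep, eceFc, eceFf, eceFi, hc, hdef, hu, hi, hf, if_true, Bool.not_false, Bool.and_true, Bool.or_self, ih]
          simp
      · rw [Bool.not_eq_true] at hdef
        by_cases him : (PySem.Str.startswith q.2 "import " || PySem.Str.startswith q.2 "from ") = true
        · simp only [eceStep, eceFc, eceFf, eceFi, hc, hdef, him, if_true, Bool.false_and, ih]
          simp
        · rw [Bool.not_eq_true] at him
          simp only [eceStep, eceFc, eceFf, eceFi, hc, hdef, him, Bool.false_and, ih]
          simp

lemma ece_portA_eq (lines : List String) :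
    extract_code_elements lines =
      ((PySem.List.enumerate (PySem.List.slice lines none (some 100)) 1).map
        (fun p => (p.1, PySem.Str.strip p.2))).foldl eceStep ([], [], []) := by
  unfold extract_code_elements
  rw [List.foldl_map]
  rfl

-- ===== VERDICT (by name: the statement is the Claim_ definition above) =====
theorem extract_code_elements_spec : Claim_equal_extract_code_elements := by
  intro lines _
  unfold Spec_extract_code_elements
  rw [ece_portA_eq, ece_foldl_split]
  rfl
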